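-- pv_equiv track=rewrite | github.com/codegod100/clmud | tools/lisp-safe-edit.py | count_parens
-- ===== SOURCE A (Python) =====
-- def count_parens(text):
--     """Count parentheses, ignoring those in strings and comments."""
--     depth = 0
--     in_string = False
--     in_comment = False
--     escape_next = False
--
--     for char in text:
--         if escape_next:
--             escape_next = False
--             continue
--
--         if in_comment:
--             if char == '\n':
--                 in_comment = False
--             continue
--
--         if in_string:
--             if char == '\\':
--                 escape_next = True
--             elif char == '"':
--                 in_string = False
--             continue
--
--         if char == ';':
--             in_comment = True
--         elif char == '"':
--             in_string = True
--         elif char == '(':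
--             depth += 1
--         elif char == ')':
--             depth -= 1
--
--     return depth
-- ===== SOURCE B (Python) =====
-- def count_parens(text):
--     """Count parentheses, ignoring those in strings and comments."""
--     depth = 0
--     i, n = 0, len(text)
--     while i < n:
--         # find the next string/comment opener; count parens in the live slice before it
--         js = text.find(';', i)
--         jq = text.find('"', i)
--         cands = [j for j in (js, jq) if j != -1]
--         j = min(cands) if cands else n
--         seg = text[i:j]
--         depth += seg.count('(') - seg.count(')')
--         if j == n:
--             break
--         if text[j] == ';':
--             # skip the comment as one region (up to and including the newline)
--             k = text.find('\n', j + 1)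
--             i = n if k == -1 else k + 1
--         else:
--             # skip the string literal as one region (backslash escapes the next char)
--             i = j + 1
--             while i < n:
--                 if text[i] == '\\':
--                     i += 2
--                 elif text[i] == '"':
--                     i += 1
--                     break
--                 else:
--                     i += 1
--     return depth
-- ===== Notes on version B (the rewrite author's own statement) =====
-- stated objective: faster
-- what changed: B replaces the per-character boolean state machine by a region-skipping scanner: it locates the next ';' or '"' with str.find, counts the parentheses of the live slice before it with slice.count, and jumps over the whole comment (find '\n') or string literal in one region step, keeping no in_string/in_comment/escape flags.
import Mathlib
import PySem

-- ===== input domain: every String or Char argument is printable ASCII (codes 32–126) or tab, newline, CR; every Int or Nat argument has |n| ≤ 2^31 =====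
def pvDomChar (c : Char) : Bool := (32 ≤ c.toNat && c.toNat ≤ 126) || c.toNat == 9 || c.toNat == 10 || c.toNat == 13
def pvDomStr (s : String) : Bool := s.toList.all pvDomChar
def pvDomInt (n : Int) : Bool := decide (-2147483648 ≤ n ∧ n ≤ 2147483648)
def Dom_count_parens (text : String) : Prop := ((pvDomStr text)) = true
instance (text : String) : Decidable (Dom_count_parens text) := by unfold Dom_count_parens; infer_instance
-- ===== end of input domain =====

-- B replaces A's per-character boolean state machine by a region-skipping scanner:
-- it counts the parens of the live slice up to the next ';' or '"', then jumps over
-- the whole comment or string literal as one region (alternative decomposition).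

-- ===== PORT A =====
-- A's loop state: (depth, in_string, in_comment, escape_next); one fold step per char
def cpStep (st : Int × Bool × Bool × Bool) (c : Char) : Int × Bool × Bool × Bool :=
  match st with
  | (d, s, com, esc) =>
    if esc then (d, s, com, false)
    else if com then (if c = '\n' then (d, s, false, esc) else (d, s, com, esc))
    else if s then
      if c = '\\' then (d, s, com, true)
      else if c = '"' then (d, false, com, esc)
      else (d, s, com, esc)
    else if c = ';' then (d, s, true, esc)
    else if c = '"' then (d, true, com, esc)
    else if c = '(' then (d + 1, s, com, esc)
    else if c = ')' then (d - 1, s, com, esc)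
    else (d, s, com, esc)

def count_parens (text : String) : Int :=
  (text.toList.foldl cpStep (0, false, false, false)).1

-- ===== PORT B =====
-- a char that does not open a string or comment (live text)
def cpLive (c : Char) : Bool := !(c = ';' || c = '"')

-- skip a comment region: everything up to and including the next '\n'
-- (B's `k = text.find('\n', j+1); i = n if k == -1 else k+1`)
def cpDropComment (l : List Char) : List Char := (l.dropWhile (· ≠ '\n')).tail

-- skip a string-literal region: backslash skips the next char (i += 2), '"' closes
def cpSkipString : List Char → List Char
  | [] => []
  | c :: r =>
    if c = '\\' then
      match r with
      | [] => []
      | _ :: r' => cpSkipString r'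
    else if c = '"' then r
    else cpSkipString r

-- paren balance of a live slice (B's `seg.count('(') - seg.count(')')`)
def cpSeg (l : List Char) : Int := (l.count '(' : Int) - (l.count ')' : Int)

lemma cpSkipString_length_le (l : List Char) : (cpSkipString l).length ≤ l.length := by
  induction l using cpSkipString.induct <;> rw [cpSkipString.eq_def] <;> simp [*] <;> omega

lemma cpDropComment_length_le (l : List Char) : (cpDropComment l).length ≤ l.length := by
  unfold cpDropComment
  rw [List.length_tail]
  have := List.length_dropWhile_le (· ≠ '\n') l
  omega

-- B's outer while-loop: take the live slice up to the next special char, count its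
-- parens, and recurse on the text after the skipped region
def cpGo (l : List Char) : Int :=
  let pre := l.takeWhile cpLive
  let rest := l.dropWhile cpLive
  match _h : rest with
  | [] => cpSeg pre
  | c :: r =>
    if c = ';' then cpSeg pre + cpGo (cpDropComment r)
    else cpSeg pre + cpGo (cpSkipString r)
termination_by l.length
decreasing_by
  all_goals
    have h2 : (List.dropWhile cpLive l) = c :: r := _h
    have h3 : r.length < l.length := by
      have := List.length_dropWhile_le cpLive l
      rw [h2] at this; simp at this; omega
  · exact Nat.lt_of_le_of_lt (cpDropComment_length_le r) h3
  · exact Nat.lt_of_le_of_lt (cpSkipString_length_le r) h3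

def count_parens_alt (text : String) : Int := cpGo text.toList

-- ===== PRECONDITION & SPEC =====
def Spec_count_parens (text : String) (out : Int) : Prop := out = count_parens_alt text
instance (text : String) (out : Int) : Decidable (Spec_count_parens text out) := by unfold Spec_count_parens; infer_instance

-- ===== CLAIM (what is proved, stated in full; the proofs are below) =====
def Claim_equal_count_parens : Prop := ∀ (text : String), Dom_count_parens text → Spec_count_parens text (count_parens text)

-- ===== LEMMAS AND PROOFS =====

-- unfolding equations for cpGo, one per branch of the region dispatch
lemma cpGo_nil (l : List Char) (h : l.dropWhile cpLive = []) :
    cpGo l = cpSeg (l.takeWhile cpLive) := by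
  rw [cpGo]; split
  · rfl
  · rename_i c r hcr; rw [h] at hcr; cases hcr

lemma cpGo_semi (l : List Char) (r : List Char) (h : l.dropWhile cpLive = ';' :: r) :
    cpGo l = cpSeg (l.takeWhile cpLive) + cpGo (cpDropComment r) := by
  rw [cpGo]; split
  · rename_i hnil; rw [h] at hnil; cases hnil
  · rename_i c r' hcr; rw [h] at hcr
    injection hcr with h1 h2; subst h1; subst h2; simp

lemma cpGo_quote (l : List Char) (c : Char) (r : List Char) (h : l.dropWhile cpLive = c :: r) (hne : ¬ c = ';') :
    cpGo l = cpSeg (l.takeWhile cpLive) + cpGo (cpSkipString r) := by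
  rw [cpGo]; split
  · rename_i hnil; rw [h] at hnil; cases hnil
  · rename_i c' r' hcr; rw [h] at hcr
    injection hcr with h1 h2; subst h1; subst h2; simp [hne]
lemma skip_nil : cpSkipString [] = [] := rfl
lemma skip_bs1 : cpSkipString ['\\'] = [] := rfl
lemma skip_bs (c : Char) (r : List Char) : cpSkipString ('\\' :: c :: r) = cpSkipString r := rfl
lemma skip_q (r : List Char) : cpSkipString ('"' :: r) = r := by
  rw [cpSkipString.eq_def]; simp
lemma skip_other {c : Char} (r : List Char) (h1 : ¬ c = '\\') (h2 : ¬ c = '"') :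
    cpSkipString (c :: r) = cpSkipString r := by
  rw [cpSkipString.eq_def]; simp [h1, h2]

-- cpStep at each of the four reachable states
lemma cpStep_comment (d : Int) (c : Char) :
    cpStep (d, false, true, false) c =
      if c = '\n' then (d, false, false, false) else (d, false, true, false) := by
  simp [cpStep]
lemma cpStep_string (d : Int) (c : Char) :
    cpStep (d, true, false, false) c =
      if c = '\\' then (d, true, false, true)
      else if c = '"' then (d, false, false, false) else (d, true, false, false) := by
  simp [cpStep]
lemma cpStep_esc (d : Int) (c : Char) : cpStep (d, true, false, true) c = (d, true, false, false) := by
  simp [cpStep]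
lemma cpStep_default (d : Int) (c : Char) :
    cpStep (d, false, false, false) c =
      if c = ';' then (d, false, true, false)
      else if c = '"' then (d, true, false, false)
      else if c = '(' then (d + 1, false, false, false)
      else if c = ')' then (d - 1, false, false, false)
      else (d, false, false, false) := by
  simp [cpStep]

-- folding A over live chars just accumulates the paren balance
lemma fold_live (pre : List Char) (h : ∀ c ∈ pre, cpLive c = true) (d : Int) :
    pre.foldl cpStep (d, false, false, false) = (d + cpSeg pre, false, false, false) := by
  induction pre generalizing d with
  | nil => simp [cpSeg]
  | cons c r ih =>
    have hc : cpLive c = true := h c (by simp)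
    have hr : ∀ x ∈ r, cpLive x = true := fun x hx => h x (by simp [hx])
    simp only [cpLive, Bool.not_eq_true', Bool.or_eq_false_iff, decide_eq_false_iff_not] at hc
    simp only [List.foldl_cons, cpStep_default]
    rw [if_neg hc.1, if_neg hc.2]
    by_cases h1 : c = '('
    · rw [if_pos h1, ih hr]
      subst h1; simp [cpSeg]; ring
    · rw [if_neg h1]
      by_cases h2 : c = ')'
      · rw [if_pos h2, ih hr]
        subst h2; simp [cpSeg]; ring
      · rw [if_neg h2, ih hr]
        simp [cpSeg, h1, h2]

-- folding A in comment state = folding the default state over the comment-skipped rest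
lemma fold_comment (r : List Char) (d : Int) :
    (r.foldl cpStep (d, false, true, false)).1 =
      ((cpDropComment r).foldl cpStep (d, false, false, false)).1 := by
  induction r with
  | nil => simp [cpDropComment]
  | cons c rest ih =>
    by_cases hc : c = '\n'
    · subst hc
      simp [List.foldl_cons, cpStep_comment, cpDropComment]
    · simp only [List.foldl_cons, cpStep_comment, if_neg hc]
      rw [ih]
      have : cpDropComment (c :: rest) = cpDropComment rest := by
        simp [cpDropComment, hc]
      rw [this]

-- folding A in string state = folding the default state over the string-skipped rest
lemma fold_string (r : List Char) (d : Int) :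
    (r.foldl cpStep (d, true, false, false)).1 =
      ((cpSkipString r).foldl cpStep (d, false, false, false)).1 := by
  induction r using cpSkipString.induct with
  | case1 => simp [skip_nil]
  | case2 => simp [skip_bs1, cpStep_string]
  | case3 c r ih =>
    simp [List.foldl_cons, cpStep_string, cpStep_esc, skip_bs]
    exact ih
  | case4 r h =>
    simp [List.foldl_cons, cpStep_string, h, skip_q]
  | case5 c r h1 h2 ih =>
    simp only [List.foldl_cons, cpStep_string, if_neg h1, if_neg h2]
    rw [skip_other r h1 h2]
    exact ih

-- the equivalence: A's fold from the default state computes B's region recursion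
lemma fold_eq_cpGo (l : List Char) : ∀ (d : Int),
    (l.foldl cpStep (d, false, false, false)).1 = d + cpGo l := by
  induction l using cpGo.induct with
  | case1 x rest hrest =>
    intro d
    rw [cpGo_nil x (show List.dropWhile cpLive x = [] from hrest)]
    conv_lhs => rw [← x.takeWhile_append_dropWhile (p := cpLive), (show List.dropWhile cpLive x = [] from hrest)]
    rw [List.foldl_append, fold_live _ (fun c hc => List.mem_takeWhile_imp hc) d]
    simp
  | case2 x rest r hrest ih =>
    intro d
    rw [cpGo_semi x r (show List.dropWhile cpLive x = ';' :: r from hrest)]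
    conv_lhs => rw [← x.takeWhile_append_dropWhile (p := cpLive), (show List.dropWhile cpLive x = ';' :: r from hrest)]
    rw [List.foldl_append, fold_live _ (fun c hc => List.mem_takeWhile_imp hc) d]
    simp [List.foldl_cons, cpStep_default]
    rw [fold_comment, ih]
    ring
  | case3 x rest c r hrest hne ih =>
    intro d
    rw [cpGo_quote x c r (show List.dropWhile cpLive x = c :: r from hrest) hne]
    have hq : c = '"' := by
      have hne' : List.dropWhile cpLive x ≠ [] := by
        rw [show List.dropWhile cpLive x = c :: r from hrest]; simp
      have hpf := List.head_dropWhile_not cpLive hne'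
      have hh : (List.dropWhile cpLive x).head hne' = c := by
        simp [show List.dropWhile cpLive x = c :: r from hrest]
      rw [hh] at hpf
      simp [cpLive, hne] at hpf
      exact hpf
    subst hq
    conv_lhs => rw [← x.takeWhile_append_dropWhile (p := cpLive), (show List.dropWhile cpLive x = '"' :: r from hrest)]
    rw [List.foldl_append, fold_live _ (fun c hc => List.mem_takeWhile_imp hc) d]
    simp [List.foldl_cons, cpStep_default]
    rw [fold_string, ih]
    ring

-- ===== VERDICT (by name: the statement is the Claim_ definition above) =====
theorem count_parens_spec : Claim_equal_count_parens := by
  intro text _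
  unfold Spec_count_parens count_parens count_parens_alt
  rw [fold_eq_cpGo]
  simp
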